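-- pv_equiv track=rewrite | github.com/Paliy2/Far-Cry-6-in-Console | test.py | is_layland
-- ===== SOURCE A (Python) =====
-- def is_layland(number):
--     if number <= 1:
--         return False
--
--     for x in range(2, number + 1):
--         for y in range(x, number + 1):
--             if x ** y + y ** x == number:
--                 return True
--     return False
-- ===== SOURCE B (Python) =====
-- def is_layland(number):
--     if number <= 1:
--         return False
--     x = 2
--     while 2 * x ** x <= number:
--         y = x
--         while True:
--             v = x ** y + y ** x
--             if v == number:
--                 return True
--             if v > number:
--                 break
--             y += 1
--         x += 1
--     return False
-- ===== Notes on version B (the rewrite author's own statement) =====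
-- stated objective: faster
-- what changed: Replaces the exhaustive double scan over all candidate pairs up to the number with while-loops that stop once the smallest possible value for the current base exceeds the number and break the inner loop as soon as the pair value exceeds the number, exploiting monotonicity of x**y + y**x.
import Mathlib
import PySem

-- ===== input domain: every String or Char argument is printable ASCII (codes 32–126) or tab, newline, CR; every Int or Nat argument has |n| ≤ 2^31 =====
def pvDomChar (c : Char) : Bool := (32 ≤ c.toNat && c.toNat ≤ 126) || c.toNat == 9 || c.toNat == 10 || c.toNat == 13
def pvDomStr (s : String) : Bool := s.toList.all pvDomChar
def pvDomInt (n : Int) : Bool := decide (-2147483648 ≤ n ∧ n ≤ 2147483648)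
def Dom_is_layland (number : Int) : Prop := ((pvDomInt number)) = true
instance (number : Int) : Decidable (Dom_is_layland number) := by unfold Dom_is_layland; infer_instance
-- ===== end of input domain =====

-- B replaces A's exhaustive O(n^2) pair scan by monotone while-loops that stop
-- once 2*x^x (resp. x^y+y^x) exceeds the number: asymptotically fewer exponentiations.

-- ===== PORT A =====
-- x ** y: both operands come from ranges starting at 2, so the exponent is nonnegative
-- and 'x ^ y.toNat' is exact.
def is_layland (number : Int) : Bool :=
  if number ≤ 1 then false
  else
    (PySem.List.pyRange 2 (number + 1) 1).any (fun x =>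
      (PySem.List.pyRange x (number + 1) 1).any (fun y =>
        x ^ y.toNat + y ^ x.toNat == number))

-- ===== PORT B =====
-- The dite guard '2 ≤ x ∧ x ≤ y' only records the loop invariant of Source B's while-loops
-- (needed for termination); it holds at every actual call.
def pvInnerLoop (number x y : Int) : Bool :=
  if h : 2 ≤ x ∧ x ≤ y then
    let v := x ^ y.toNat + y ^ x.toNat
    if v = number then true
    else if number < v then false
    else pvInnerLoop number x (y + 1)
  else false
termination_by (number - y).toNat
decreasing_by
  obtain ⟨hx, hxy⟩ := h
  have hy0 : (0:Int) ≤ y := by omega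
  have h1 : (y.toNat : Int) < 2 ^ y.toNat := by
    exact_mod_cast Nat.lt_two_pow_self
  have h2 : (2:Int) ^ y.toNat ≤ x ^ y.toNat := by gcongr
  have h3 : (0:Int) ≤ y ^ x.toNat := pow_nonneg (by omega) _
  have hyc : (y.toNat : Int) = y := Int.toNat_of_nonneg hy0
  have hvlt : x ^ y.toNat + y ^ x.toNat < number := by omega
  have : y < number := by omega
  omega

def pvOuterLoop (number x : Int) : Bool :=
  if h : 2 ≤ x then
    if 2 * x ^ x.toNat ≤ number then
      if pvInnerLoop number x x then true
      else pvOuterLoop number (x + 1)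
    else false
  else false
termination_by (number - x).toNat
decreasing_by
  have hx0 : (0:Int) ≤ x := by omega
  have h1 : (x.toNat : Int) < 2 ^ x.toNat := by
    exact_mod_cast Nat.lt_two_pow_self
  have h2 : (2:Int) ^ x.toNat ≤ x ^ x.toNat := by gcongr
  have hxc : (x.toNat : Int) = x := Int.toNat_of_nonneg hx0
  have : x < number := by omega
  omega

def is_layland_alt (number : Int) : Bool :=
  if number ≤ 1 then false else pvOuterLoop number 2

-- ===== PRECONDITION & SPEC =====
def Spec_is_layland (number : Int) (out : Bool) : Prop := out = is_layland_alt number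
instance (number : Int) (out : Bool) : Decidable (Spec_is_layland number out) := by unfold Spec_is_layland; infer_instance

-- ===== CLAIM (what is proved, stated in full; the proofs are below) =====
def Claim_equal_is_layland : Prop := ∀ (number : Int), Dom_is_layland number → Spec_is_layland number (is_layland number)

-- ===== LEMMAS AND PROOFS =====

-- the shared pair value x**y + y**x
def pvF (x y : Int) : Int := x ^ y.toNat + y ^ x.toNat

theorem pvF_mono_y (x y z : Int) (hx : 2 ≤ x) (hxy : x ≤ y) (hyz : y ≤ z) :
    pvF x y ≤ pvF x z := by
  unfold pvF
  have h1 : x ^ y.toNat ≤ x ^ z.toNat := by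
    gcongr
    · omega
    · exact Int.toNat_le_toNat hyz
  have h2 : y ^ x.toNat ≤ z ^ x.toNat := by gcongr; omega
  omega

theorem pvF_lower (x a z : Int) (hx : 2 ≤ x) (hxa : x ≤ a) (haz : a ≤ z) :
    2 * x ^ x.toNat ≤ pvF a z := by
  unfold pvF
  have h1 : x ^ x.toNat ≤ a ^ x.toNat := by gcongr
  have h2 : a ^ x.toNat ≤ a ^ a.toNat := by
    gcongr
    · omega
    · exact Int.toNat_le_toNat hxa
  have h3 : a ^ a.toNat ≤ a ^ z.toNat := by
    gcongr
    · omega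
    · exact Int.toNat_le_toNat haz
  have h4 : a ^ a.toNat ≤ z ^ a.toNat := by
    gcongr
    omega
  omega

theorem pvF_bound (x y number : Int) (hx : 2 ≤ x) (hxy : x ≤ y) (hf : pvF x y = number) :
    y ≤ number := by
  unfold pvF at hf
  have h1 : y ≤ y ^ x.toNat := by
    calc y = y ^ 1 := (pow_one y).symm
    _ ≤ y ^ x.toNat := by
        gcongr
        · omega
        · omega
  have h2 : (0:Int) ≤ x ^ y.toNat := pow_nonneg (by omega) _
  omega

theorem inner_iff (number x y : Int) :
    pvInnerLoop number x y = true ↔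
      (2 ≤ x ∧ x ≤ y ∧ ∃ z, y ≤ z ∧ pvF x z = number) := by
  fun_induction pvInnerLoop number x y with
  | case1 y h v hv =>
      have hfv : pvF x y = v := rfl
      exact iff_of_true rfl ⟨h.1, h.2, y, le_refl y, by omega⟩
  | case2 y h v hne hlt =>
      refine iff_of_false (by simp) ?_
      rintro ⟨hx, hxy, z, hz, hfz⟩
      have hm : pvF x y ≤ pvF x z := pvF_mono_y x y z hx hxy hz
      have hfv : pvF x y = v := rfl
      omega
  | case3 y h v hne hle ih =>
      rw [ih]
      have hfv : pvF x y = v := rfl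
      constructor
      · rintro ⟨hx, -, z, hz, hfz⟩
        exact ⟨hx, h.2, z, by omega, hfz⟩
      · rintro ⟨hx, hxy, z, hz, hfz⟩
        refine ⟨hx, by omega, z, ?_, hfz⟩
        rcases eq_or_lt_of_le hz with hzy | hzy
        · exfalso; rw [← hzy] at hfz; omega
        · omega
  | case4 y h =>
      refine iff_of_false (by simp) ?_
      rintro ⟨hx, hxy, -⟩
      exact h ⟨hx, hxy⟩

theorem outer_iff (number x : Int) :
    pvOuterLoop number x = true ↔
      (2 ≤ x ∧ ∃ a, x ≤ a ∧ ∃ z, a ≤ z ∧ pvF a z = number) := by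
  fun_induction pvOuterLoop number x with
  | case1 x h hle hinner =>
      refine iff_of_true rfl ?_
      obtain ⟨-, -, z, hz, hfz⟩ := (inner_iff number x x).mp hinner
      exact ⟨h, x, le_refl x, z, hz, hfz⟩
  | case2 x h hle hinner ih =>
      rw [ih]
      constructor
      · rintro ⟨-, a, ha, z, hz, hfz⟩
        exact ⟨h, a, by omega, z, hz, hfz⟩
      · rintro ⟨-, a, ha, z, hz, hfz⟩
        have hax : 2 ≤ a := by omega
        rcases eq_or_lt_of_le ha with hxa | hxa
        · exfalso
          have : pvInnerLoop number x x = true :=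
            (inner_iff number x x).mpr ⟨h, le_refl x, z, by omega, by rw [hxa]; exact hfz⟩
          simp [this] at hinner
        · exact ⟨by omega, a, by omega, z, hz, hfz⟩
  | case3 x h hgt =>
      refine iff_of_false (by simp) ?_
      rintro ⟨-, a, ha, z, hz, hfz⟩
      have := pvF_lower x a z h ha hz
      omega
  | case4 x h =>
      refine iff_of_false (by simp) ?_
      rintro ⟨hx, -⟩
      exact h hx

theorem a_iff (number : Int) (h : ¬ number ≤ 1) :
    is_layland number = true ↔
      ∃ a, (2 ≤ a ∧ a < number + 1) ∧ ∃ z, (a ≤ z ∧ z < number + 1) ∧ pvF a z = number := by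
  simp only [is_layland, if_neg h, List.any_eq_true, PySem.List.mem_pyRange_one,
    beq_iff_eq, pvF]

-- ===== VERDICT (by name: the statement is the Claim_ definition above) =====
theorem is_layland_spec : Claim_equal_is_layland := by
  unfold Claim_equal_is_layland
  intro number _
  unfold Spec_is_layland
  by_cases h : number ≤ 1
  · simp [is_layland, is_layland_alt, h]
  · rw [Bool.eq_iff_iff, a_iff number h]
    unfold is_layland_alt
    rw [if_neg h, outer_iff]
    constructor
    · rintro ⟨a, ⟨ha1, ha2⟩, z, ⟨hz1, hz2⟩, hf⟩
      exact ⟨by norm_num, a, ha1, z, hz1, hf⟩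
    · rintro ⟨-, a, ha, z, hz, hf⟩
      have hb : z ≤ number := pvF_bound a z number ha hz hf
      exact ⟨a, ⟨ha, by omega⟩, z, ⟨hz, by omega⟩, hf⟩
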